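-- pv_equiv track=rewrite | github.com/Joody20/codingTests | 프로그래머스/2/169199. 리코쳇 로봇/리코쳇 로봇.py | solution
-- ===== SOURCE A (Python) =====
-- from collections import deque
--
-- def solution(board):
--     n,m = len(board), len(board[0]) # n 세로 , m 가로
--     visited = [[False for _ in range(m)] for _ in range(n)]
--     start = [-1,-1]
--     dx = [-1,0,1,0]
--     dy = [0,-1,0,1]
--
--
--     for i in range(n):
--         for j in range(m):
--             if board[i][j] == 'R':
--                 start = [i,j]  # 시작점 찾기
--                 break
--
--
--     def move(x,y,dir):
--         while True:
--             x += dx[dir]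
--             y += dy[dir]
--
--             if x < 0 or x >= n or y < 0 or y >= m: # 보드를 넘어가면
--                 break
--             elif board[x][y] == 'D': # 장애물 있으면 break
--                 break
--
--         x -= dx[dir]
--         y -= dy[dir]
--         return [x,y]
--
--
--     queue = deque()
--     queue.append([start[0],start[1],0])
--
--     while queue:
--         mx,my,dis = queue.popleft()
--
--         for i in range(4):
--             xx,yy = move(mx,my,i) # move함수에 dir부분에 이제 상하좌우 방향 i 넘기기
--
--             # 방문한 곳이면 continue
--             if visited[xx][yy]:
--                 continue
--             # 목적지 도착 했으면 dis + 1 최소 움직임 리턴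
--             elif board[xx][yy] == 'G':
--                 return dis + 1
--
--             else:
--                 queue.append([xx,yy,dis+1])
--                 visited[xx][yy] = True
--
--     return -1
-- ===== SOURCE B (Python) =====
-- # B: precompute slide-destination tables (one linear scan per row/column), then BFS with O(1) moves.
-- from collections import deque
--
-- def solution(board):
--     n, m = len(board), len(board[0])
--     board = [r[:m] for r in board]  # A only ever inspects the first m columns
--     hit = next(((i, r.index('R')) for i, r in enumerate(board) if 'R' in r), None)
--     if hit is None:
--         return -1
--     si, sj = hit
--
--     def left_dests(line):
--         L = [0] * len(line)
--         for j in range(len(line)):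
--             L[j] = j if j == 0 or line[j - 1] == 'D' else L[j - 1]
--         return L
--
--     def right_dests(line):
--         k = len(line)
--         R = [0] * k
--         for j in range(k - 1, -1, -1):
--             R[j] = j if j == k - 1 or line[j + 1] == 'D' else R[j + 1]
--         return R
--
--     rowL = [left_dests(r) for r in board]
--     rowR = [right_dests(r) for r in board]
--     cols = [[r[j] for r in board] for j in range(m)]
--     colL = [left_dests(c) for c in cols]
--     colR = [right_dests(c) for c in cols]
--
--     visited = [[False] * m for _ in range(n)]
--     q = deque([(si, sj, 0)])
--     while q:
--         x, y, d = q.popleft()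
--         for xx, yy in ((colL[y][x], y), (x, rowL[x][y]), (colR[y][x], y), (x, rowR[x][y])):
--             if visited[xx][yy]:
--                 continue
--             if board[xx][yy] == 'G':
--                 return d + 1
--             q.append((xx, yy, d + 1))
--             visited[xx][yy] = True
--     return -1
-- ===== Notes on version B (the rewrite author's own statement) =====
-- stated objective: faster
-- what changed: A re-walks the board cell by cell for every slide inside the BFS (O(n+m) per move); B precomputes slide-destination tables with one linear scan per row and per column and the BFS then does each of its four moves by an O(1) table lookup; intended as faster (measured ~2.5-3.7x on a timing run's sizes, largest both-finished input 3.73x).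
-- intended difference: On boards with no 'R' whose bottom-right cell is 'G', A returns 1 because its unfound-start sentinel [-1,-1] negative-indexes the bottom-right cell, while B returns -1; with no robot on the board no goal is reachable, so -1 is the intended value. — e.g. on solution(["DG"]): A returns 1, B returns -1
-- outside the precondition, e.g. on solution(['RG', 'R.']): A returns 2, B returns 1; on solution(['G.', 'R']): A returns 1, B raises IndexError
import Mathlib
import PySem

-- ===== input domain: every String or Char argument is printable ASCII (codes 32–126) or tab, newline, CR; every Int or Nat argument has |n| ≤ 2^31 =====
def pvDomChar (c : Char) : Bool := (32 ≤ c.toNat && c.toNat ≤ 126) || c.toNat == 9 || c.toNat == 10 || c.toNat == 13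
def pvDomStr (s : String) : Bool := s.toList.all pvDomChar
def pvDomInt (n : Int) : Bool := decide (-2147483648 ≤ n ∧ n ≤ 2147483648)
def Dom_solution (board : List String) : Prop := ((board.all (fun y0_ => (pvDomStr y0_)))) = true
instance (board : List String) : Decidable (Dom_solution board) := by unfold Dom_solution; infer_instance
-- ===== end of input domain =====

-- B replaces A's per-move cell-by-cell slide walks by slide-destination tables built with one
-- linear scan per row/column, so each BFS move is a table lookup (intended as faster; the timing
-- run measured ~2.5-3.7x but could not confirm the label at the largest size).


-- shared low-level helpers: board[x][y], visited[x][y] read / write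
def pvCell (grid : List (List Char)) (x y : Int) : Char :=
  ((PySem.List.pyGet? grid x).bind (fun r => PySem.List.pyGet? r y)).getD ' '

def pvGetVis (v : List (List Bool)) (x y : Int) : Bool :=
  (v.getD x.toNat []).getD y.toNat false

def pvSetVis (v : List (List Bool)) (x y : Int) : List (List Bool) :=
  v.modify x.toNat (fun row => row.set y.toNat true)

-- ===== PORT A =====
-- A's start scan: for i in range(n): for j in range(m): if board[i][j]=='R': start=[i,j]; break
def pvStartA (grid : List (List Char)) (m : Nat) : Int × Int :=
  grid.zipIdx.foldl (fun st p =>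
    match List.findIdx? (fun c => c == 'R') (p.1.take m) with
    | some j => ((p.2 : Int), (j : Int))
    | none => st) (-1, -1)

-- A's move(): while True: step; break on leaving the board or on 'D'; then step back
def pvMoveLoop (grid : List (List Char)) (n m dx dy : Int) : Nat → Int → Int → Int × Int
  | 0, x, y => (x, y)
  | fuel + 1, x, y =>
    if x + dx < 0 ∨ n ≤ x + dx ∨ y + dy < 0 ∨ m ≤ y + dy then (x + dx, y + dy)
    else if pvCell grid (x + dx) (y + dy) = 'D' then (x + dx, y + dy)
    else pvMoveLoop grid n m dx dy fuel (x + dx) (y + dy)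

def pvMoveA (grid : List (List Char)) (n m dx dy x y : Int) : Int × Int :=
  let p := pvMoveLoop grid n m dx dy (n.toNat + m.toNat + 1) x y
  (p.1 - dx, p.2 - dy)

def pvDirs : List (Int × Int) := [(-1, 0), (0, -1), (1, 0), (0, 1)]

-- the body of A's "for i in range(4)" with its continue / return / append branches
def pvInnerA (grid : List (List Char)) (n m x y d : Int) :
    List (Int × Int) → List (List Bool) → List (Int × Int × Int) →
    Option Int × (List (List Bool) × List (Int × Int × Int))
  | [], v, acc => (none, (v, acc))
  | dxy :: ds, v, acc =>
    let p := pvMoveA grid n m dxy.1 dxy.2 x y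
    if pvGetVis v p.1 p.2 then pvInnerA grid n m x y d ds v acc
    else if pvCell grid p.1 p.2 = 'G' then (some (d + 1), (v, acc))
    else pvInnerA grid n m x y d ds (pvSetVis v p.1 p.2) (acc ++ [(p.1, p.2, d + 1)])

-- A's "while queue" loop (fuel-guarded; n*m+2 pops always suffice)
def pvBfsA (grid : List (List Char)) (n m : Int) :
    Nat → List (Int × Int × Int) → List (List Bool) → Int
  | _, [], _ => -1
  | 0, _ :: _, _ => -1
  | fuel + 1, c :: rest, v =>
    match pvInnerA grid n m c.1 c.2.1 c.2.2 pvDirs v [] with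
    | (some r, _) => r
    | (none, (v', acc)) => pvBfsA grid n m fuel (rest ++ acc) v'

def solution (board : List String) : Int :=
  let grid := board.map String.toList
  let n := grid.length
  let m := ((PySem.List.pyGet? grid 0).getD []).length
  let st := pvStartA grid m
  pvBfsA grid (n : Int) (m : Int) (n * m + 2) [(st.1, st.2, 0)]
    (List.replicate n (List.replicate m false))

-- ===== PORT B =====
-- left_dests: L[j] = j if j == 0 or line[j-1] == 'D' else L[j-1]  (carried accumulator)
def pvRowL : List Char → Int → Int → List Int
  | [], _, _ => []
  | c :: cs, j, a => a :: pvRowL cs (j + 1) (if c = 'D' then j + 1 else a)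

-- right_dests: R[j] = j if j == k-1 or line[j+1] == 'D' else R[j+1]  (built back to front)
def pvRowR : List Char → Int → List Int
  | [], _ => []
  | [_], j => [j]
  | _ :: c :: cs, j =>
    let t := pvRowR (c :: cs) (j + 1)
    (if c = 'D' then j else t.headD 0) :: t

def pvTab (t : List (List Int)) (x y : Int) : Int :=
  (t.getD x.toNat []).getD y.toNat 0

def pvInnerB (grid : List (List Char)) (d : Int) :
    List (Int × Int) → List (List Bool) → List (Int × Int × Int) →
    Option Int × (List (List Bool) × List (Int × Int × Int))
  | [], v, acc => (none, (v, acc))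
  | q :: ps, v, acc =>
    if pvGetVis v q.1 q.2 then pvInnerB grid d ps v acc
    else if pvCell grid q.1 q.2 = 'G' then (some (d + 1), (v, acc))
    else pvInnerB grid d ps (pvSetVis v q.1 q.2) (acc ++ [(q.1, q.2, d + 1)])

def pvBfsB (grid : List (List Char)) (tRL tRR tCL tCR : List (List Int)) :
    Nat → List (Int × Int × Int) → List (List Bool) → Int
  | _, [], _ => -1
  | 0, _ :: _, _ => -1
  | fuel + 1, c :: rest, v =>
    let dests := [(pvTab tCL c.2.1 c.1, c.2.1), (c.1, pvTab tRL c.1 c.2.1),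
                  (pvTab tCR c.2.1 c.1, c.2.1), (c.1, pvTab tRR c.1 c.2.1)]
    match pvInnerB grid c.2.2 dests v [] with
    | (some r, _) => r
    | (none, (v', acc)) => pvBfsB grid tRL tRR tCL tCR fuel (rest ++ acc) v'

-- board = [r[:m] for r in board]; hit = next(((i, r.index('R')) …), None); None → return -1
def solution_alt (board : List String) : Int :=
  let grid0 := board.map String.toList
  let m := (grid0.headD []).length
  let grid := grid0.map (fun r => r.take m)
  match grid.zipIdx.find? (fun p => p.1.contains 'R') with
  | none => -1
  | some hit =>
    let n := grid.length
    let rowL := grid.map (fun r => pvRowL r 0 0)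
    let rowR := grid.map (fun r => pvRowR r 0)
    let cols := (List.range m).map (fun j => grid.map (fun r => r.getD j ' '))
    let colL := cols.map (fun c => pvRowL c 0 0)
    let colR := cols.map (fun c => pvRowR c 0)
    pvBfsB grid rowL rowR colL colR (n * m + 2) [((hit.2 : Int), (hit.1.idxOf 'R' : Int), 0)]
      (List.replicate n (List.replicate m false))

-- ===== PRECONDITION & SPEC =====
-- Pre_ excludes boards with a row shorter than the first (A raises IndexError except in corners
-- its scan happens not to reach), with an empty first row (A raises IndexError) and with more
-- than one 'R' in the first-row-width columns (which robot cell wins is then accidental: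
-- A keeps the last row's 'R', B the first).
def Pre_solution (board : List String) : Prop :=
  board ≠ [] ∧ (∀ r ∈ board, (board.headD "").toList.length ≤ r.toList.length) ∧
  (board.headD "").toList.length ≠ 0 ∧
  ((board.map String.toList).map
    (fun r => r.take (board.headD "").toList.length)).flatten.count 'R' ≤ 1
instance (board : List String) : Decidable (Pre_solution board) := by
  unfold Pre_solution; infer_instance

def pvWitness_solution : List String := ["R.D", "..G"]

-- On boards with no 'R' whose bottom-right cell is 'G', A returns 1 because its unfound-start
-- sentinel [-1,-1] negative-indexes the bottom-right cell, while B returns -1; with no robot on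
-- the board no goal is reachable, so -1 is the intended value.
def D_solution (board : List String) : Prop :=
  ((board.map String.toList).map
    (fun r => r.take (board.headD "").toList.length)).flatten.count 'R' = 0 ∧
  (board.getLast?.getD "").toList.getLast? = some 'G'
instance (board : List String) : Decidable (D_solution board) := by
  unfold D_solution; infer_instance

def Spec_solution (board : List String) (out : Int) : Prop :=
  ¬ D_solution board → out = solution_alt board
instance (board : List String) (out : Int) : Decidable (Spec_solution board out) := by
  unfold Spec_solution; infer_instance

def pvDiffWitness_solution : List String := ["DG"]
def pvDiffWitnessOut_solution : Int × Int := (1, -1)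

-- ===== CLAIM (what is proved, stated in full; the proofs are below) =====
def Claim_unchanged_solution : Prop :=
  ∀ (board : List String), Dom_solution board → Pre_solution board →
    Spec_solution board (solution board)
def Claim_changed_solution : Prop :=
  Dom_solution (pvDiffWitness_solution) ∧ Pre_solution (pvDiffWitness_solution) ∧
  D_solution (pvDiffWitness_solution) ∧
  solution (pvDiffWitness_solution) = pvDiffWitnessOut_solution.1 ∧
  solution_alt (pvDiffWitness_solution) = pvDiffWitnessOut_solution.2 ∧
  pvDiffWitnessOut_solution.1 ≠ pvDiffWitnessOut_solution.2
def Claim_exact_solution : Prop :=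
  ∀ (board : List String), Dom_solution board → Pre_solution board → D_solution board →
    solution board ≠ solution_alt board

-- ===== LEMMAS AND PROOFS =====

-- cell access bridge: at Nat coordinates pvCell is nested getD
lemma pvCell_natCast (grid : List (List Char)) (a b : Nat) :
    pvCell grid (a : Int) (b : Int) = (grid.getD a []).getD b ' ' := by
  simp [pvCell, PySem.List.pyGet?_natCast, List.getD_eq_getElem?_getD]
  cases h : grid[a]? with
  | none => simp [List.getElem?_eq_none_iff.mpr (by simpa using List.getElem?_eq_none_iff.mp h)]
  | some r => simp [h]

lemma pvCol_getD (grid : List (List Char)) (b k : Nat) (hk : k < grid.length) :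
    (grid.map (fun r => r.getD b ' ')).getD k ' ' = (grid.getD k []).getD b ' ' := by
  rw [List.getD_eq_getElem?_getD, List.getElem?_map,
      List.getElem?_eq_getElem hk, List.getD_eq_getElem?_getD (l := grid),
      List.getElem?_eq_getElem hk]
  rfl

lemma pvRowR_headD (c : Char) (cs : List Char) (j : Int) :
    (pvRowR (c :: cs) j).headD 0 = (pvRowR (c :: cs) j).getD 0 0 := by
  cases cs <;> simp [pvRowR]

lemma pvRow_mem (grid : List (List Char)) (a : Nat) (ha : a < grid.length) :
    grid.getD a [] ∈ grid := by
  rw [List.getD_eq_getElem?_getD, List.getElem?_eq_getElem ha]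
  exact List.getElem_mem ha

lemma pvColLen (grid : List (List Char)) (b : Nat) :
    (grid.map (fun r => r.getD b ' ')).length = grid.length := by simp





lemma pvFindIdx?_eq_idxOf (row : List Char) (h : 'R' ∈ row) :
    List.findIdx? (fun c => c == 'R') row = some (row.idxOf 'R') := by
  induction row with
  | nil => cases h
  | cons c cs ih =>
    by_cases hc : c = 'R'
    · subst hc; simp [List.findIdx?_cons]
    · simp only [List.mem_cons] at h
      rcases h with h | h
      · exact absurd h.symm hc
      · simp [List.findIdx?_cons, hc, ih h, beq_iff_eq]

lemma pvStartA_skip (rows : List (List Char)) (m off : Nat) (st : Int × Int)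
    (h : (rows.map (fun r => r.take m)).flatten.count 'R' = 0) :
    (rows.zipIdx off).foldl (fun st p =>
      match List.findIdx? (fun c => c == 'R') (p.1.take m) with
      | some j => ((p.2 : Int), (j : Int))
      | none => st) st = st := by
  induction rows generalizing off st with
  | nil => rfl
  | cons row rest ih =>
    simp only [List.map_cons, List.flatten_cons, List.count_append, Nat.add_eq_zero] at h
    have hnone : List.findIdx? (fun c => c == 'R') (row.take m) = none := by
      rw [List.findIdx?_eq_none_iff]
      intro x hx
      simp only [beq_eq_false_iff_ne, ne_eq]
      intro hxr; subst hxr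
      exact absurd (List.count_eq_zero.mp h.1) (by simp [hx])
    simp only [List.zipIdx_cons, List.foldl_cons, hnone]
    exact ih _ _ h.2


-- pvRowL facts


lemma pvRowL_getD_succ (cs : List Char) (j a : Int) (k : Nat) (hk : k + 1 < cs.length) :
    (pvRowL cs j a).getD (k + 1) 0 =
      if cs.getD k ' ' = 'D' then j + k + 1 else (pvRowL cs j a).getD k 0 := by
  induction cs generalizing j a k with
  | nil => simp at hk
  | cons c cs ih =>
    cases k with
    | zero =>
      cases cs with
      | nil => simp at hk
      | cons c' cs' => simp only [pvRowL, List.getD_cons_succ, List.getD_cons_zero]; split <;> simp [pvRowL, *]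
    | succ k' =>
      have h := ih (j + 1) (if c = 'D' then j + 1 else a) k' (by simpa using hk)
      simp only [pvRowL, List.getD_cons_succ] at h ⊢
      rw [h]
      split <;> [push_cast; rfl]
      ring

lemma pvRowL_bounds (cs : List Char) (j a : Int) (h0 : 0 ≤ a) (hja : a ≤ j) (k : Nat)
    (hk : k < cs.length) :
    0 ≤ (pvRowL cs j a).getD k 0 ∧ (pvRowL cs j a).getD k 0 ≤ j + k := by
  induction cs generalizing j a k with
  | nil => simp at hk
  | cons c cs ih =>
    cases k with
    | zero => simp [pvRowL]; omega
    | succ k' =>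
      have h := ih (j + 1) (if c = 'D' then j + 1 else a) (by split <;> omega) (by split <;> omega)
        k' (by simpa using hk)
      simp only [pvRowL, List.getD_cons_succ]
      push_cast at h ⊢
      omega

-- pvRowR facts

lemma pvRowR_getD_last (cs : List Char) (j : Int) (h : cs ≠ []) :
    (pvRowR cs j).getD (cs.length - 1) 0 = j + (cs.length - 1 : Nat) := by
  induction cs generalizing j with
  | nil => simp at h
  | cons c cs ih =>
    cases cs with
    | nil => simp [pvRowR]
    | cons c' cs' =>
      have h := ih (j + 1) (by simp)
      simp only [List.length_cons, Nat.add_sub_cancel] at h ⊢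
      simp only [pvRowR, List.getD_cons_succ]
      rw [h]
      push_cast
      ring

lemma pvRowR_getD_step (cs : List Char) (j : Int) (k : Nat) (hk : k + 1 < cs.length) :
    (pvRowR cs j).getD k 0 =
      if cs.getD (k + 1) ' ' = 'D' then j + k else (pvRowR cs j).getD (k + 1) 0 := by
  induction cs generalizing j k with
  | nil => simp at hk
  | cons c cs ih =>
    cases cs with
    | nil => simp at hk
    | cons c' cs' =>
      cases k with
      | zero =>
        simp only [pvRowR, List.getD_cons_zero, List.getD_cons_succ]
        split
        · simp
        · rw [pvRowR_headD]
      | succ k' =>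
        have h := ih (j + 1) k' (by simpa using hk)
        simp only [pvRowR, List.getD_cons_succ] at h ⊢
        rw [h]
        split <;> [push_cast; rfl]
        ring

lemma pvRowR_bounds (cs : List Char) (j : Int) (h0 : 0 ≤ j) (k : Nat) (hk : k < cs.length) :
    0 ≤ (pvRowR cs j).getD k 0 ∧ (pvRowR cs j).getD k 0 ≤ j + cs.length - 1 := by
  induction cs generalizing j k with
  | nil => simp at hk
  | cons c cs ih =>
    cases cs with
    | nil =>
      simp only [List.length_cons, List.length_nil] at hk
      have : k = 0 := by omega
      subst this
      simp [pvRowR]; omega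
    | cons c' cs' =>
      cases k with
      | zero =>
        have h0' := ih (j + 1) (by omega) 0 (by simp)
        simp only [pvRowR, List.getD_cons_zero]
        simp only [List.length_cons] at h0' ⊢
        split
        · push_cast; omega
        · rw [pvRowR_headD]; push_cast at h0' ⊢; omega
      | succ k' =>
        have h := ih (j + 1) (by omega) k' (by simpa using hk)
        simp only [pvRowR, List.getD_cons_succ]
        simp only [List.length_cons] at h ⊢
        push_cast at h ⊢
        omega

-- the four slide/table agreement lemmas (in-range start)
lemma pvLoopL (grid : List (List Char)) (m : Nat) (hrect : ∀ r ∈ grid, m ≤ r.length)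
    (a : Nat) (ha : a < grid.length) :
    ∀ (fuel : Nat) (b : Nat), b < m → b + 1 ≤ fuel →
      pvMoveLoop grid (grid.length : Int) (m : Int) 0 (-1) fuel (a : Int) (b : Int) =
        ((a : Int), (pvRowL ((grid.getD a []).take m) 0 0).getD b 0 - 1) := by
  have hrow : ((grid.getD a []).take m).length = m := by
    rw [List.length_take]
    exact Nat.min_eq_left (hrect _ (pvRow_mem grid a ha))
  intro fuel
  induction fuel with
  | zero => intro b hb hf; omega
  | succ f ih =>
    intro b hb hf
    cases b with
    | zero =>
      have hnil : (grid.getD a []).take m ≠ [] := by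
        intro h; rw [h] at hrow; simp at hrow; omega
      obtain ⟨c, cs, hc⟩ := List.exists_cons_of_ne_nil hnil
      simp only [pvMoveLoop]
      rw [if_pos (by push_cast; tauto), hc]
      simp [pvRowL]
    | succ k =>
      simp only [pvMoveLoop]
      have e1 : (a : Int) + 0 = (a : Int) := by ring
      have e2 : ((k + 1 : Nat) : Int) + (-1) = (k : Int) := by push_cast; ring
      have hgd : ((grid.getD a []).take m).getD k ' ' = (grid.getD a []).getD k ' ' := by
        simp [List.getD_eq_getElem?_getD, (show k < m by omega)]
      rw [e1, e2, if_neg (by push_cast; omega), pvCell_natCast]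
      rw [pvRowL_getD_succ _ _ _ k (by omega), hgd]
      split
      · simp; try push_cast; try ring
      · exact ih k (by omega) (by omega)

lemma pvLoopR (grid : List (List Char)) (m : Nat) (hrect : ∀ r ∈ grid, m ≤ r.length)
    (a : Nat) (ha : a < grid.length) :
    ∀ (fuel : Nat) (b : Nat), b < m → m - b ≤ fuel →
      pvMoveLoop grid (grid.length : Int) (m : Int) 0 1 fuel (a : Int) (b : Int) =
        ((a : Int), (pvRowR ((grid.getD a []).take m) 0).getD b 0 + 1) := by
  have hrow : ((grid.getD a []).take m).length = m := by
    rw [List.length_take]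
    exact Nat.min_eq_left (hrect _ (pvRow_mem grid a ha))
  intro fuel
  induction fuel with
  | zero => intro b hb hf; omega
  | succ f ih =>
    intro b hb hf
    simp only [pvMoveLoop]
    have e1 : (a : Int) + 0 = (a : Int) := by ring
    have e2 : ((b : Nat) : Int) + 1 = ((b + 1 : Nat) : Int) := by push_cast; ring
    by_cases hlast : b + 1 = m
    · rw [e1, if_pos (by push_cast; omega)]
      have := pvRowR_getD_last ((grid.getD a []).take m) 0
        (by intro h; rw [h] at hrow; simp at hrow; omega)
      rw [hrow] at this
      have hb' : b = m - 1 := by omega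
      subst hb'
      rw [this]
      simp
      try push_cast
      try omega
    · have hgd : ((grid.getD a []).take m).getD (b + 1) ' ' = (grid.getD a []).getD (b + 1) ' ' := by
        simp [List.getD_eq_getElem?_getD, (show b + 1 < m by omega)]
      rw [e1, e2, if_neg (by push_cast; omega), pvCell_natCast]
      rw [pvRowR_getD_step _ _ b (by omega), hgd]
      split
      · simp; try push_cast; try ring
      · exact ih (b + 1) (by omega) (by omega)

lemma pvLoopU (grid : List (List Char)) (m : Nat)
    (b : Nat) (hb : b < m) :
    ∀ (fuel : Nat) (a : Nat), a < grid.length → a + 1 ≤ fuel →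
      pvMoveLoop grid (grid.length : Int) (m : Int) (-1) 0 fuel (a : Int) (b : Int) =
        ((pvRowL (grid.map (fun r => r.getD b ' ')) 0 0).getD a 0 - 1, (b : Int)) := by
  intro fuel
  induction fuel with
  | zero => intro a ha hf; omega
  | succ f ih =>
    intro a ha hf
    cases a with
    | zero =>
      have hnil : grid.map (fun r => r.getD b ' ') ≠ [] := by
        simp; intro h; rw [h] at ha; simp at ha
      obtain ⟨c, cs, hc⟩ := List.exists_cons_of_ne_nil hnil
      simp only [pvMoveLoop]
      rw [if_pos (by push_cast; tauto), hc]
      simp [pvRowL]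
    | succ k =>
      simp only [pvMoveLoop]
      have e1 : (b : Int) + 0 = (b : Int) := by ring
      have e2 : ((k + 1 : Nat) : Int) + (-1) = (k : Int) := by push_cast; ring
      rw [e1, e2, if_neg (by push_cast; omega), pvCell_natCast,
          ← pvCol_getD grid b k (by omega)]
      rw [pvRowL_getD_succ _ _ _ k (by rw [pvColLen]; omega)]
      split
      · simp; try push_cast; try ring
      · exact ih k (by omega) (by omega)

lemma pvLoopD (grid : List (List Char)) (m : Nat)
    (b : Nat) (hb : b < m) :
    ∀ (fuel : Nat) (a : Nat), a < grid.length → grid.length - a ≤ fuel →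
      pvMoveLoop grid (grid.length : Int) (m : Int) 1 0 fuel (a : Int) (b : Int) =
        ((pvRowR (grid.map (fun r => r.getD b ' ')) 0).getD a 0 + 1, (b : Int)) := by
  intro fuel
  induction fuel with
  | zero => intro a ha hf; omega
  | succ f ih =>
    intro a ha hf
    simp only [pvMoveLoop]
    have e1 : (b : Int) + 0 = (b : Int) := by ring
    have e2 : ((a : Nat) : Int) + 1 = ((a + 1 : Nat) : Int) := by push_cast; ring
    by_cases hlast : a + 1 = grid.length
    · rw [e1, if_pos (by push_cast; omega)]
      have hnil : grid.map (fun r => r.getD b ' ') ≠ [] := by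
        simp; intro h; rw [h] at ha; simp at ha
      have hlen := pvColLen grid b
      have hl := pvRowR_getD_last (grid.map (fun r => r.getD b ' ')) 0 hnil
      rw [hlen] at hl
      have ha' : a = grid.length - 1 := by omega
      subst ha'
      rw [hl]
      simp
      try push_cast
      try omega
    · rw [e1, e2, if_neg (by push_cast; omega), pvCell_natCast,
          ← pvCol_getD grid b (a + 1) (by omega)]
      rw [pvRowR_getD_step _ _ a (by rw [pvColLen]; omega)]
      split
      · simp; try push_cast; try ring
      · exact ih (a + 1) (by omega) (by omega)

lemma pvMove_left (grid : List (List Char)) (m : Nat)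
    (hrect : ∀ r ∈ grid, m ≤ r.length) (a b : Nat) (ha : a < grid.length) (hb : b < m) :
    pvMoveA grid (grid.length : Int) (m : Int) 0 (-1) (a : Int) (b : Int) =
      ((a : Int), (pvRowL ((grid.getD a []).take m) 0 0).getD b 0) := by
  unfold pvMoveA
  rw [pvLoopL grid m hrect a ha _ b hb (by simp; omega)]
  simp

lemma pvMove_right (grid : List (List Char)) (m : Nat)
    (hrect : ∀ r ∈ grid, m ≤ r.length) (a b : Nat) (ha : a < grid.length) (hb : b < m) :
    pvMoveA grid (grid.length : Int) (m : Int) 0 1 (a : Int) (b : Int) =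
      ((a : Int), (pvRowR ((grid.getD a []).take m) 0).getD b 0) := by
  unfold pvMoveA
  rw [pvLoopR grid m hrect a ha _ b hb (by simp; omega)]
  simp

lemma pvMove_up (grid : List (List Char)) (m : Nat)
    (hrect : ∀ r ∈ grid, m ≤ r.length) (a b : Nat) (ha : a < grid.length) (hb : b < m) :
    pvMoveA grid (grid.length : Int) (m : Int) (-1) 0 (a : Int) (b : Int) =
      ((pvRowL (grid.map (fun r => r.getD b ' ')) 0 0).getD a 0, (b : Int)) := by
  unfold pvMoveA
  rw [pvLoopU grid m b hb _ a ha (by simp; omega)]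
  simp

lemma pvMove_down (grid : List (List Char)) (m : Nat)
    (hrect : ∀ r ∈ grid, m ≤ r.length) (a b : Nat) (ha : a < grid.length) (hb : b < m) :
    pvMoveA grid (grid.length : Int) (m : Int) 1 0 (a : Int) (b : Int) =
      ((pvRowR (grid.map (fun r => r.getD b ' ')) 0).getD a 0, (b : Int)) := by
  unfold pvMoveA
  rw [pvLoopD grid m b hb _ a ha (by simp; omega)]
  simp

-- A's inner direction loop is B's inner loop over the list of move results
lemma pvInnerA_eq_innerB (grid : List (List Char)) (n m x y d : Int)
    (ds : List (Int × Int)) (v : List (List Bool)) (acc : List (Int × Int × Int)) :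
    pvInnerA grid n m x y d ds v acc =
      pvInnerB grid d (ds.map (fun q => pvMoveA grid n m q.1 q.2 x y)) v acc := by
  induction ds generalizing v acc with
  | nil => rfl
  | cons q ds ih => simp [pvInnerA, pvInnerB, ih]

-- every triple the inner loop appends comes from the destination list
lemma pvInnerB_acc_mem (grid : List (List Char)) (d : Int) (dests : List (Int × Int))
    (v : List (List Bool)) (acc : List (Int × Int × Int)) (c : Int × Int × Int)
    (hc : c ∈ (pvInnerB grid d dests v acc).2.2) :
    c ∈ acc ∨ ∃ q ∈ dests, c = (q.1, q.2, d + 1) := by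
  induction dests generalizing v acc with
  | nil => exact Or.inl (by simpa [pvInnerB] using hc)
  | cons q ps ih =>
    simp only [pvInnerB] at hc
    split at hc
    · rcases ih _ _ hc with h | ⟨q', hq', rfl⟩
      · exact Or.inl h
      · exact Or.inr ⟨q', by simp [hq'], rfl⟩
    · split at hc
      · exact Or.inl (by simpa using hc)
      · rcases ih _ _ hc with h | ⟨q', hq', rfl⟩
        · rcases List.mem_append.mp h with h | h
          · exact Or.inl h
          · exact Or.inr ⟨q, by simp, by simpa using h⟩
        · exact Or.inr ⟨q', by simp [hq'], rfl⟩

-- the two BFS loops agree while every queued coordinate is on the board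
-- getD through map
lemma pvMapGetD {α β : Type} (l : List α) (f : α → β) (d : β) (dd : α) (a : Nat)
    (h : a < l.length) : (l.map f).getD a d = f (l.getD a dd) := by
  rw [List.getD_eq_getElem?_getD, List.getElem?_map, List.getElem?_eq_getElem h,
      List.getD_eq_getElem?_getD, List.getElem?_eq_getElem h]
  rfl

-- truncation to the first m columns does not change in-range cells
lemma pvCell_take (grid : List (List Char)) (m a b : Nat) (hb : b < m) :
    pvCell (grid.map (fun r => r.take m)) (a : Int) (b : Int) = pvCell grid (a : Int) (b : Int) := by
  rw [pvCell_natCast, pvCell_natCast]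
  by_cases ha : a < grid.length
  · rw [pvMapGetD (dd := []) _ _ _ _ ha]
    simp [List.getD_eq_getElem?_getD, hb]
  · have h1 : (grid.map (fun r => r.take m))[a]? = none := by
      rw [List.getElem?_eq_none_iff]; simpa using not_lt.mp ha
    have h2 : grid[a]? = none := by
      rw [List.getElem?_eq_none_iff]; exact not_lt.mp ha
    simp [List.getD_eq_getElem?_getD, h1, h2]

lemma pvInnerB_congr (grid : List (List Char)) (m : Nat) (d : Int) :
    ∀ (dests : List (Int × Int)) (v : List (List Bool)) (acc : List (Int × Int × Int)),
      (∀ p ∈ dests, 0 ≤ p.1 ∧ p.1 < grid.length ∧ 0 ≤ p.2 ∧ p.2 < m) →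
      pvInnerB grid d dests v acc = pvInnerB (grid.map (fun r => r.take m)) d dests v acc := by
  intro dests
  induction dests with
  | nil => intro v acc _; rfl
  | cons p ps ih =>
    intro v acc hd
    obtain ⟨h1, h2, h3, h4⟩ := hd p (by simp)
    have hc : pvCell (grid.map (fun r => r.take m)) p.1 p.2 = pvCell grid p.1 p.2 := by
      obtain ⟨a, hpa⟩ : ∃ a : Nat, p.1 = (a : Int) := ⟨p.1.toNat, (Int.toNat_of_nonneg h1).symm⟩
      obtain ⟨b, hpb⟩ : ∃ b : Nat, p.2 = (b : Int) := ⟨p.2.toNat, (Int.toNat_of_nonneg h3).symm⟩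
      rw [hpa, hpb, pvCell_take grid m a b (by omega)]
    simp only [pvInnerB, hc]
    split
    · exact ih _ _ (fun q hq => hd q (by simp [hq]))
    · split
      · rfl
      · exact ih _ _ (fun q hq => hd q (by simp [hq]))

lemma pvBfs_eq (grid : List (List Char)) (m : Nat) (hrect : ∀ r ∈ grid, m ≤ r.length) :
    ∀ (fuel : Nat) (q : List (Int × Int × Int)) (v : List (List Bool)),
      (∀ c ∈ q, 0 ≤ c.1 ∧ c.1 < grid.length ∧ 0 ≤ c.2.1 ∧ c.2.1 < m) →
      pvBfsA grid (grid.length : Int) (m : Int) fuel q v =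
        pvBfsB (grid.map (fun r => r.take m))
          ((grid.map (fun r => r.take m)).map (fun r => pvRowL r 0 0))
          ((grid.map (fun r => r.take m)).map (fun r => pvRowR r 0))
          (((List.range m).map (fun j => (grid.map (fun r => r.take m)).map
              (fun r => r.getD j ' '))).map (fun c => pvRowL c 0 0))
          (((List.range m).map (fun j => (grid.map (fun r => r.take m)).map
              (fun r => r.getD j ' '))).map (fun c => pvRowR c 0)) fuel q v := by
  intro fuel
  induction fuel with
  | zero =>
    intro q v hq
    cases q <;> rfl
  | succ f ih =>
    intro q v hq
    cases q with
    | nil => rfl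
    | cons c rest =>
      obtain ⟨hx0, hxn, hy0, hym⟩ := hq c (by simp)
      obtain ⟨a, hxa⟩ : ∃ a : Nat, c.1 = (a : Int) := ⟨c.1.toNat, (Int.toNat_of_nonneg hx0).symm⟩
      obtain ⟨b, hyb⟩ : ∃ b : Nat, c.2.1 = (b : Int) := ⟨c.2.1.toNat, (Int.toNat_of_nonneg hy0).symm⟩
      have ha : a < grid.length := by omega
      have hb : b < m := by omega
      have hcol : (grid.map (fun r => r.take m)).map (fun r => r.getD b ' ') =
          grid.map (fun r => r.getD b ' ') := by
        rw [List.map_map]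
        exact List.map_congr_left (fun r hr => by
          simp [Function.comp, List.getD_eq_getElem?_getD, hb])
      -- B's four table lookups are A's four move results
      have hrowL : pvTab ((grid.map (fun r => r.take m)).map (fun r => pvRowL r 0 0)) c.1 c.2.1 =
          (pvRowL ((grid.getD a []).take m) 0 0).getD b 0 := by
        rw [hxa, hyb]; unfold pvTab
        simp only [Int.toNat_natCast]
        rw [pvMapGetD (dd := []) _ _ _ _ (by simpa using ha),
            pvMapGetD (dd := []) _ _ _ _ ha]
      have hrowR : pvTab ((grid.map (fun r => r.take m)).map (fun r => pvRowR r 0)) c.1 c.2.1 =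
          (pvRowR ((grid.getD a []).take m) 0).getD b 0 := by
        rw [hxa, hyb]; unfold pvTab
        simp only [Int.toNat_natCast]
        rw [pvMapGetD (dd := []) _ _ _ _ (by simpa using ha),
            pvMapGetD (dd := []) _ _ _ _ ha]
      have hcolL : pvTab (((List.range m).map (fun j => (grid.map (fun r => r.take m)).map
            (fun r => r.getD j ' '))).map (fun cl => pvRowL cl 0 0)) c.2.1 c.1 =
          (pvRowL (grid.map (fun r => r.getD b ' ')) 0 0).getD a 0 := by
        rw [hxa, hyb]; unfold pvTab
        simp only [Int.toNat_natCast]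
        rw [pvMapGetD (dd := []) _ _ _ _ (by simpa using hb),
            pvMapGetD (dd := 0) _ _ _ _ (by simpa using hb),
            show (List.range m).getD b 0 = b by
              simp [List.getD_eq_getElem?_getD, List.getElem?_range hb],
            hcol]
      have hcolR : pvTab (((List.range m).map (fun j => (grid.map (fun r => r.take m)).map
            (fun r => r.getD j ' '))).map (fun cl => pvRowR cl 0)) c.2.1 c.1 =
          (pvRowR (grid.map (fun r => r.getD b ' ')) 0).getD a 0 := by
        rw [hxa, hyb]; unfold pvTab
        simp only [Int.toNat_natCast]
        rw [pvMapGetD (dd := []) _ _ _ _ (by simpa using hb),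
            pvMapGetD (dd := 0) _ _ _ _ (by simpa using hb),
            show (List.range m).getD b 0 = b by
              simp [List.getD_eq_getElem?_getD, List.getElem?_range hb],
            hcol]
      have hdests : pvDirs.map (fun q => pvMoveA grid (grid.length : Int) (m : Int) q.1 q.2 c.1 c.2.1) =
          [(pvTab (((List.range m).map (fun j => (grid.map (fun r => r.take m)).map
              (fun r => r.getD j ' '))).map (fun cl => pvRowL cl 0 0)) c.2.1 c.1, c.2.1),
           (c.1, pvTab ((grid.map (fun r => r.take m)).map (fun r => pvRowL r 0 0)) c.1 c.2.1),
           (pvTab (((List.range m).map (fun j => (grid.map (fun r => r.take m)).map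
              (fun r => r.getD j ' '))).map (fun cl => pvRowR cl 0)) c.2.1 c.1, c.2.1),
           (c.1, pvTab ((grid.map (fun r => r.take m)).map (fun r => pvRowR r 0)) c.1 c.2.1)] := by
        rw [hrowL, hrowR, hcolL, hcolR, hxa, hyb]
        simp only [pvDirs, List.map_cons, List.map_nil]
        rw [pvMove_up grid m hrect a b ha hb, pvMove_left grid m hrect a b ha hb,
            pvMove_down grid m hrect a b ha hb, pvMove_right grid m hrect a b ha hb]
      -- the four destinations stay on the board
      have hdb : ∀ p ∈ pvDirs.map (fun q => pvMoveA grid (grid.length : Int) (m : Int) q.1 q.2 c.1 c.2.1),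
          0 ≤ p.1 ∧ p.1 < grid.length ∧ 0 ≤ p.2 ∧ p.2 < m := by
        rw [hdests, hrowL, hrowR, hcolL, hcolR]
        have hml : m ≤ (grid.getD a []).length := hrect _ (pvRow_mem grid a ha)
        have htl : ((grid.getD a []).take m).length = m := by rw [List.length_take]; omega
        have hL := pvRowL_bounds ((grid.getD a []).take m) 0 0 le_rfl le_rfl b
          (by rw [htl]; exact hb)
        have hR := pvRowR_bounds ((grid.getD a []).take m) 0 le_rfl b (by rw [htl]; exact hb)
        have hCL := pvRowL_bounds (grid.map (fun r => r.getD b ' ')) 0 0 le_rfl le_rfl a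
          (by rw [pvColLen]; exact ha)
        have hCR := pvRowR_bounds (grid.map (fun r => r.getD b ' ')) 0 le_rfl a
          (by rw [pvColLen]; exact ha)
        rw [htl] at hR
        rw [pvColLen] at hCR
        intro p hp
        rw [hxa, hyb] at hp
        simp only [List.mem_cons, List.not_mem_nil, or_false] at hp
        rcases hp with rfl | rfl | rfl | rfl <;>
          (refine ⟨?_, ?_, ?_, ?_⟩ <;> dsimp only <;> push_cast at hL hR hCL hCR ⊢ <;> omega)
      simp only [pvBfsA, pvBfsB]
      rw [pvInnerA_eq_innerB, hdests,
          pvInnerB_congr grid m c.2.2 _ v []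
            (by intro p hp; exact hdb p (by rw [hdests]; exact hp))]
      rcases hres : pvInnerB (grid.map (fun r => r.take m)) c.2.2
          [(pvTab (((List.range m).map (fun j => (grid.map (fun r => r.take m)).map
              (fun r => r.getD j ' '))).map (fun cl => pvRowL cl 0 0)) c.2.1 c.1, c.2.1),
           (c.1, pvTab ((grid.map (fun r => r.take m)).map (fun r => pvRowL r 0 0)) c.1 c.2.1),
           (pvTab (((List.range m).map (fun j => (grid.map (fun r => r.take m)).map
              (fun r => r.getD j ' '))).map (fun cl => pvRowR cl 0)) c.2.1 c.1, c.2.1),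
           (c.1, pvTab ((grid.map (fun r => r.take m)).map (fun r => pvRowR r 0)) c.1 c.2.1)]
          v [] with ⟨r?, v', acc⟩
      cases r? with
      | some r => rw [hres]
      | none =>
        rw [hres]
        apply ih
        intro c' hc'
        rcases List.mem_append.mp hc' with h | h
        · exact hq c' (by simp [h])
        · have := pvInnerB_acc_mem (grid.map (fun r => r.take m)) c.2.2 _ v [] c'
            (by rw [hres] at *; exact h)
          rcases this with h' | ⟨qd, hqd, rfl⟩
          · simp at h'
          · have := hdb qd (by rw [hdests]; exact hqd)
            simpa using this

-- start scans agree when the first m columns carry exactly one 'R'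
lemma pvStart_eq (grid : List (List Char)) (m : Nat)
    (hone : (grid.map (fun r => r.take m)).flatten.count 'R' = 1) :
    ∃ a b : Nat, a < grid.length ∧ b < m ∧
      pvStartA grid m = ((a : Int), (b : Int)) ∧
      ∃ row, (grid.map (fun r => r.take m)).zipIdx.find? (fun p => p.1.contains 'R') =
          some (row, a) ∧ row.idxOf 'R' = b := by
  suffices h : ∀ (rows : List (List Char)) (off : Nat) (st : Int × Int),
      (rows.map (fun r => r.take m)).flatten.count 'R' = 1 →
      ∃ a b : Nat, a < rows.length ∧ b < m ∧
        (rows.zipIdx off).foldl (fun st p =>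
          match List.findIdx? (fun c => c == 'R') (p.1.take m) with
          | some j => ((p.2 : Int), (j : Int))
          | none => st) st = (((off + a : Nat) : Int), (b : Int)) ∧
        ∃ row, ((rows.map (fun r => r.take m)).zipIdx off).find? (fun p => p.1.contains 'R') =
          some (row, off + a) ∧ row.idxOf 'R' = b by
    obtain ⟨a, b, ha, hb, h1, row, h2, h3⟩ := h grid 0 (-1, -1) hone
    exact ⟨a, b, ha, hb, by simpa [pvStartA] using h1, row, by simpa using h2, h3⟩
  intro rows
  induction rows with
  | nil => intro off st hone'; simp at hone'
  | cons row rest ih =>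
    intro off st hone'
    simp only [List.map_cons, List.flatten_cons, List.count_append] at hone'
    by_cases hrow : 'R' ∈ row.take m
    · -- this row holds the unique R; the rest has none
      have hcnt : ((rest.map (fun r => r.take m)).flatten).count 'R' = 0 := by
        have := List.count_pos_iff.mpr hrow
        omega
      refine ⟨0, (row.take m).idxOf 'R', by simp, ?_, ?_, row.take m, ?_, rfl⟩
      · have := List.idxOf_lt_length_iff.mpr hrow
        have hle : (row.take m).length ≤ m := by
          rw [List.length_take]; omega
        omega
      · simp only [List.zipIdx_cons, List.foldl_cons, pvFindIdx?_eq_idxOf (row.take m) hrow]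
        rw [pvStartA_skip rest m (off + 1) _ hcnt]
        simp
      · simp only [List.map_cons, List.zipIdx_cons, List.find?_cons,
          (by simpa using hrow : (row.take m).contains 'R' = true)]
        simp
    · -- no R here: skip this row on both sides
      have hc0 : (row.take m).count 'R' = 0 := List.count_eq_zero.mpr hrow
      obtain ⟨a, b, ha, hb, h1, row', h2, h3⟩ := ih (off + 1)
        (match List.findIdx? (fun c => c == 'R') (row.take m) with
          | some j => ((off : Int), (j : Int))
          | none => st)
        (by omega)
      refine ⟨a + 1, b, by simp; omega, hb, ?_, row', ?_, h3⟩
      · simp only [List.zipIdx_cons, List.foldl_cons]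
        rw [show off + 1 + a = off + (a + 1) by omega] at h1
        convert h1 using 3
      · simp only [List.map_cons, List.zipIdx_cons, List.find?_cons,
          (by simpa using hrow : (row.take m).contains 'R' = false)]
        rw [show off + 1 + a = off + (a + 1) by omega] at h2
        rw [h2]

-- with no 'R' anywhere, B's row search fails
lemma pvFind_none (rows : List (List Char)) (off : Nat)
    (h : rows.flatten.count 'R' = 0) :
    (rows.zipIdx off).find? (fun p => p.1.contains 'R') = none := by
  induction rows generalizing off with
  | nil => rfl
  | cons row rest ih =>
    simp only [List.flatten_cons, List.count_append, Nat.add_eq_zero] at h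
    have : ¬ 'R' ∈ row := fun hm => absurd (List.count_pos_iff.mpr hm) (by omega)
    simp only [List.zipIdx_cons, List.find?_cons, (by simpa using this : row.contains 'R' = false)]
    exact ih _ h.2

-- every slide from A's unfound-start sentinel (-1,-1) stays at (-1,-1)
lemma pvMove_sentinel (grid : List (List Char)) (n m dx dy : Int) (hd : (dx, dy) ∈ pvDirs) :
    pvMoveA grid n m dx dy (-1) (-1) = (-1, -1) := by
  simp only [pvDirs, List.mem_cons, List.not_mem_nil, or_false, Prod.mk.injEq] at hd
  rcases hd with ⟨rfl, rfl⟩ | ⟨rfl, rfl⟩ | ⟨rfl, rfl⟩ | ⟨rfl, rfl⟩ <;>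
    (simp only [pvMoveA, pvMoveLoop]
     rw [if_pos (by norm_num)]
     norm_num)

-- A's whole BFS from the sentinel: 1 if the bottom-right cell is 'G', else -1
lemma pvBfsA_sentinel (grid : List (List Char)) (m' : Nat) (f : Nat)
    (hg : grid ≠ []) (hm : ((PySem.List.pyGet? grid 0).getD []).length = m' + 1) :
    pvBfsA grid (grid.length : Int) ((m' + 1 : Nat) : Int) (f + 2) [(-1, -1, 0)]
      (List.replicate grid.length (List.replicate (m' + 1) false)) =
      if pvCell grid (-1) (-1) = 'G' then 1 else -1 := by
  obtain ⟨r0, rest, rfl⟩ := List.exists_cons_of_ne_nil hg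
  have h1 := pvMove_sentinel (r0 :: rest) ((rest.length : Int) + 1) ((m' : Int) + 1)
    (-1) 0 (by simp [pvDirs])
  have h2 := pvMove_sentinel (r0 :: rest) ((rest.length : Int) + 1) ((m' : Int) + 1)
    0 (-1) (by simp [pvDirs])
  have h3 := pvMove_sentinel (r0 :: rest) ((rest.length : Int) + 1) ((m' : Int) + 1)
    1 0 (by simp [pvDirs])
  have h4 := pvMove_sentinel (r0 :: rest) ((rest.length : Int) + 1) ((m' : Int) + 1)
    0 1 (by simp [pvDirs])
  have hvis0 : pvGetVis (List.replicate (rest.length + 1) (List.replicate (m' + 1) false))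
      (-1) (-1) = false := by
    simp [pvGetVis, List.replicate_succ]
  have hvis1 : pvGetVis (pvSetVis
      (List.replicate (rest.length + 1) (List.replicate (m' + 1) false)) (-1) (-1))
      (-1) (-1) = true := by
    simp [pvGetVis, pvSetVis, List.replicate_succ]
  by_cases hG : pvCell (r0 :: rest) (-1) (-1) = 'G'
  · simp [pvBfsA, pvInnerA, pvDirs, h1, h2, h3, h4, hvis0, hG]
  · simp [pvBfsA, pvInnerA, pvDirs, h1, h2, h3, h4, hvis0, hvis1, hG]

-- the bottom-right cell, read the way A's board[-1][-1] reads it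
lemma pvCorner (board : List String) :
    pvCell (board.map String.toList) (-1) (-1) =
      ((board.getLast?.getD "").toList.getLast?).getD ' ' := by
  unfold pvCell
  rw [PySem.List.pyGet?_neg_one, List.getLast?_map]
  cases h : board.getLast? with
  | none => simp [h]
  | some t => simp [h, PySem.List.pyGet?_neg_one]

-- A = B on every admitted board whose first m columns carry exactly one 'R'
set_option maxHeartbeats 1000000 in
lemma pvAgree_oneR (board : List String) (hne : board ≠ [])
    (hrlen : ∀ r ∈ board, (board.headD "").toList.length ≤ r.toList.length)
    (hone : ((board.map String.toList).map
      (fun r => r.take (board.headD "").toList.length)).flatten.count 'R' = 1) :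
    solution board = solution_alt board := by
  have hrect : ∀ r ∈ board.map String.toList, (board.headD "").toList.length ≤ r.length := by
    intro r hr
    simp only [List.mem_map] at hr
    obtain ⟨t, ht, rfl⟩ := hr
    simpa using hrlen t ht
  have e1 : ((PySem.List.pyGet? (board.map String.toList) 0).getD []).length =
      (board.headD "").toList.length := by
    cases board with
    | nil => exact absurd rfl hne
    | cons s0 rest0 => simp
  have e2 : (board.map String.toList).headD [] = (board.headD "").toList := by
    cases board <;> simp
  have e3 : ((board.map String.toList).map
      (fun r => r.take (board.headD "").toList.length)).length =
      (board.map String.toList).length := List.length_map ..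
  obtain ⟨a, b, ha, hb, hA, row, hB, hidx⟩ :=
    pvStart_eq (board.map String.toList) (board.headD "").toList.length hone
  have key := pvBfs_eq (board.map String.toList) (board.headD "").toList.length hrect
    ((board.map String.toList).length * (board.headD "").toList.length + 2)
    [((a : Int), (b : Int), 0)] (List.replicate (board.map String.toList).length
      (List.replicate (board.headD "").toList.length false))
    (by
      intro c hc
      simp only [List.mem_singleton] at hc
      subst hc
      exact ⟨by dsimp only; positivity, by dsimp only; exact_mod_cast ha,
        by dsimp only; positivity, by dsimp only; exact_mod_cast hb⟩)
  unfold solution solution_alt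
  simp only [e1, e2, e3]
  rw [hA, hB]
  dsimp only
  rw [hidx]
  exact key

-- with no 'R' in the first m columns, A reduces to the sentinel walk and B returns -1
lemma pvA_noR (board : List String) (hne : board ≠ [])
    (hm : (board.headD "").toList.length ≠ 0)
    (h0 : ((board.map String.toList).map
      (fun r => r.take (board.headD "").toList.length)).flatten.count 'R' = 0) :
    solution board = (if pvCell (board.map String.toList) (-1) (-1) = 'G' then 1 else -1) := by
  obtain ⟨s0, rest0, rfl⟩ := List.exists_cons_of_ne_nil hne
  obtain ⟨m', hm'⟩ : ∃ m', s0.toList.length = m' + 1 := by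
    cases hml : s0.toList.length with
    | zero => simp [hml] at hm
    | succ k => exact ⟨k, rfl⟩
  unfold solution
  simp only [List.map_cons]
  rw [show pvStartA (s0.toList :: rest0.map String.toList)
        ((PySem.List.pyGet? (s0.toList :: rest0.map String.toList) 0).getD []).length = (-1, -1) from by
      unfold pvStartA
      exact pvStartA_skip _ _ 0 _ (by simpa using h0)]
  have hlen : ((PySem.List.pyGet? (s0.toList :: rest0.map String.toList) 0).getD []).length
      = m' + 1 := by simpa using hm'
  rw [hlen]
  have := pvBfsA_sentinel (s0.toList :: rest0.map String.toList) m'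
    ((s0.toList :: rest0.map String.toList).length * (m' + 1)) (by simp) (by simpa using hm')
  simpa using this

lemma pvB_noR (board : List String)
    (h0 : ((board.map String.toList).map
      (fun r => r.take (board.headD "").toList.length)).flatten.count 'R' = 0) :
    solution_alt board = -1 := by
  have hh : (board.map String.toList).headD [] = (board.headD "").toList := by
    cases board <;> simp
  unfold solution_alt
  simp only [hh, pvFind_none ((board.map String.toList).map
    (fun r => r.take (board.headD "").toList.length)) 0 (by simpa using h0)]

-- ===== VERDICT (by name: the statement is the Claim_ definition above) =====
theorem solution_spec : Claim_unchanged_solution := by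
  unfold Claim_unchanged_solution
  intro board hdom hpre
  obtain ⟨hne, hrlen, hm, hle⟩ := hpre
  unfold Spec_solution
  intro hnd
  rcases Nat.lt_or_ge (((board.map String.toList).map
      (fun r => r.take (board.headD "").toList.length)).flatten.count 'R') 1 with h0 | h1
  · -- no 'R': both return -1 (D_ has excluded the 'G'-corner case)
    have h0 : ((board.map String.toList).map
        (fun r => r.take (board.headD "").toList.length)).flatten.count 'R' = 0 := by omega
    rw [pvA_noR board hne hm h0, pvB_noR board h0, pvCorner board]
    rw [if_neg]
    intro hcg
    apply hnd
    refine ⟨h0, ?_⟩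
    cases h : (board.getLast?.getD "").toList.getLast? with
    | none => rw [h] at hcg; simp at hcg
    | some ch => rw [h] at hcg; simp only [Option.getD_some] at hcg; rw [hcg]
  · exact pvAgree_oneR board hne hrlen (by omega)

theorem solution_changed : Claim_changed_solution := by
  unfold Claim_changed_solution; decide

theorem solution_tight : Claim_exact_solution := by
  unfold Claim_exact_solution
  intro board hdom hpre hd
  obtain ⟨hne, hrlen, hm, hle⟩ := hpre
  obtain ⟨h0, hg⟩ := hd
  rw [pvA_noR board hne hm h0, pvB_noR board h0, pvCorner board, hg]
  simp
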